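-- pv_equiv track=rewrite | github.com/carloswinck/lotofacil | estudo_sorteados_e_ausentes.py | aplicar_filtros
-- ===== SOURCE A (Python) =====
-- NUMEROS_PRIMOS = {2, 3, 5, 7, 11, 13, 17, 19, 23}
--
-- NUMEROS_FIBONACCI = {1, 2, 3, 5, 8, 13, 21}
--
-- NUMEROS_MAGICOS = {5, 6, 7, 12, 13, 14, 19, 20, 21}
--
-- NUMEROS_MULTIPLOS_3 = {3, 6, 9, 12, 15, 18, 21, 24}
--
-- def aplicar_filtros(numeros, filtros):
--     count_primos = len([num for num in numeros if num in NUMEROS_PRIMOS])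
--     count_fibonacci = len([num for num in numeros if num in NUMEROS_FIBONACCI])
--     count_magicos = len([num for num in numeros if num in NUMEROS_MAGICOS])
--     count_multiplos_3 = len([num for num in numeros if num in NUMEROS_MULTIPLOS_3])
--
--     if not (filtros['primos'][0] <= count_primos <= filtros['primos'][1] and
--             filtros['fibonacci'][0] <= count_fibonacci <= filtros['fibonacci'][1] and
--             filtros['magicos'][0] <= count_magicos <= filtros['magicos'][1] and
--             filtros['multiplos_3'][0] <= count_multiplos_3 <= filtros['multiplos_3'][1]):
--         return False
--     return True
-- ===== SOURCE B (Python) =====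
-- NUMEROS_PRIMOS = {2, 3, 5, 7, 11, 13, 17, 19, 23}
--
-- NUMEROS_FIBONACCI = {1, 2, 3, 5, 8, 13, 21}
--
-- NUMEROS_MAGICOS = {5, 6, 7, 12, 13, 14, 19, 20, 21}
--
-- NUMEROS_MULTIPLOS_3 = {3, 6, 9, 12, 15, 18, 21, 24}
--
--
-- def aplicar_filtros(numeros, filtros):
--     # Build a histogram of numeros once, then count each category by summing
--     # the histogram over the (small, constant) category set itself.
--     cnt = {}
--     for num in numeros:
--         cnt[num] = cnt.get(num, 0) + 1
--
--     checks = [("primos", NUMEROS_PRIMOS),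
--               ("fibonacci", NUMEROS_FIBONACCI),
--               ("magicos", NUMEROS_MAGICOS),
--               ("multiplos_3", NUMEROS_MULTIPLOS_3)]
--     return all(
--         filtros[nome][0] <= sum(cnt.get(v, 0) for v in grupo) <= filtros[nome][1]
--         for nome, grupo in checks)
-- ===== Notes on version B (the rewrite author's own statement) =====
-- stated objective: alternative
-- what changed: B builds a dict histogram of numeros once and computes each category count by summing the histogram over the small constant category set (reversed traversal: loop over the sets, not over numeros per set), with the four range checks driven by a data table via all(); A scans numeros four times with membership tests.
import Mathlib
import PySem

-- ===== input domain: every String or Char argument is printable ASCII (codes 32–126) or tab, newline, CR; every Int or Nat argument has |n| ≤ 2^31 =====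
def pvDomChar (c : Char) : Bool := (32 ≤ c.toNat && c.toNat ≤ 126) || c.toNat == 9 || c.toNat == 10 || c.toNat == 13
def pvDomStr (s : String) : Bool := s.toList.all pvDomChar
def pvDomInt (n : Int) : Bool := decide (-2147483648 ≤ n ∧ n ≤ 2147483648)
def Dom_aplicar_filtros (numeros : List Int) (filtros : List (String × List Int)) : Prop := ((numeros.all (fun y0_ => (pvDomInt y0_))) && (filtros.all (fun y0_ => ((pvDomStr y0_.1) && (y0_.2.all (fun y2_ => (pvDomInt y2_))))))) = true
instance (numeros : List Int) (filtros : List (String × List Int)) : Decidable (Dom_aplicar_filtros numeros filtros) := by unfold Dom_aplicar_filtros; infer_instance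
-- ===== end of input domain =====

-- B builds a dict histogram of numeros once and computes each category count by summing the
-- histogram over the constant category set (reversed traversal), with the four range checks
-- driven by a data table; equivalence proved where A raises no KeyError/IndexError.

-- ===== PORT A =====
def pvPrimos : List Int := [2, 3, 5, 7, 11, 13, 17, 19, 23]
def pvFibonacci : List Int := [1, 2, 3, 5, 8, 13, 21]
def pvMagicos : List Int := [5, 6, 7, 12, 13, 14, 19, 20, 21]
def pvMultiplos3 : List Int := [3, 6, 9, 12, 15, 18, 21, 24]

-- filtros[k][i] for i ∈ {0,1}; total via defaults, exact on Pre_ (Python raises outside it)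
def pvGet (filtros : List (String × List Int)) (k : String) (i : Int) : Int :=
  (PySem.List.pyGet? (((filtros.find? (fun p => p.1 == k)).map (·.2)).getD []) i).getD 0

def aplicar_filtros (numeros : List Int) (filtros : List (String × List Int)) : Bool :=
  let count_primos : Int := (numeros.filter (fun num => decide (num ∈ pvPrimos))).length
  let count_fibonacci : Int := (numeros.filter (fun num => decide (num ∈ pvFibonacci))).length
  let count_magicos : Int := (numeros.filter (fun num => decide (num ∈ pvMagicos))).length
  let count_multiplos_3 : Int := (numeros.filter (fun num => decide (num ∈ pvMultiplos3))).length
  if ¬(pvGet filtros "primos" 0 ≤ count_primos ∧ count_primos ≤ pvGet filtros "primos" 1 ∧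
       pvGet filtros "fibonacci" 0 ≤ count_fibonacci ∧ count_fibonacci ≤ pvGet filtros "fibonacci" 1 ∧
       pvGet filtros "magicos" 0 ≤ count_magicos ∧ count_magicos ≤ pvGet filtros "magicos" 1 ∧
       pvGet filtros "multiplos_3" 0 ≤ count_multiplos_3 ∧ count_multiplos_3 ≤ pvGet filtros "multiplos_3" 1) then
    false
  else
    true

-- ===== PORT B =====
def pvChecks : List (String × List Int) :=
  [("primos", pvPrimos), ("fibonacci", pvFibonacci), ("magicos", pvMagicos), ("multiplos_3", pvMultiplos3)]

def aplicar_filtros_alt (numeros : List Int) (filtros : List (String × List Int)) : Bool :=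
  let cnt : PySem.Dict Int Int :=
    numeros.foldl (fun d num => d.insert num (d.getD num 0 + 1)) PySem.Dict.empty
  pvChecks.all (fun check =>
    let occ : Int := (check.2.map (fun v => cnt.getD v 0)).sum
    decide (pvGet filtros check.1 0 ≤ occ ∧ occ ≤ pvGet filtros check.1 1))

-- ===== PRECONDITION & SPEC =====
-- Pre_ excludes exactly the inputs on which the Python A raises (KeyError/IndexError):
-- the chained, short-circuited range check only demands filtros[k][0] (and, if that bound
-- holds, filtros[k][1]) for the keys it actually reaches, so the no-raise condition is the
-- nested guard below over the four category counts of numeros.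
def pvLen (filtros : List (String × List Int)) (k : String) : Nat :=
  ((((filtros.find? (fun p => p.1 == k)).map (·.2)).getD []).length)

def pvCountIn (numeros : List Int) (l : List Int) : Int :=
  ((numeros.filter (fun num => decide (num ∈ l))).length : Int)

def Pre_aplicar_filtros (numeros : List Int) (filtros : List (String × List Int)) : Prop :=
  1 ≤ pvLen filtros "primos" ∧
  (pvGet filtros "primos" 0 ≤ pvCountIn numeros pvPrimos →
    2 ≤ pvLen filtros "primos" ∧
    (pvCountIn numeros pvPrimos ≤ pvGet filtros "primos" 1 →
      1 ≤ pvLen filtros "fibonacci" ∧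
      (pvGet filtros "fibonacci" 0 ≤ pvCountIn numeros pvFibonacci →
        2 ≤ pvLen filtros "fibonacci" ∧
        (pvCountIn numeros pvFibonacci ≤ pvGet filtros "fibonacci" 1 →
          1 ≤ pvLen filtros "magicos" ∧
          (pvGet filtros "magicos" 0 ≤ pvCountIn numeros pvMagicos →
            2 ≤ pvLen filtros "magicos" ∧
            (pvCountIn numeros pvMagicos ≤ pvGet filtros "magicos" 1 →
              1 ≤ pvLen filtros "multiplos_3" ∧
              (pvGet filtros "multiplos_3" 0 ≤ pvCountIn numeros pvMultiplos3 →
                2 ≤ pvLen filtros "multiplos_3")))))))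
instance (numeros : List Int) (filtros : List (String × List Int)) : Decidable (Pre_aplicar_filtros numeros filtros) := by unfold Pre_aplicar_filtros; infer_instance

def pvWitness_aplicar_filtros : List Int × (List (String × List Int)) :=
  ([1, 2, 3, 6], [("primos", [0, 5]), ("fibonacci", [0, 5]), ("magicos", [0, 5]), ("multiplos_3", [0, 5])])

def Spec_aplicar_filtros (numeros : List Int) (filtros : List (String × List Int)) (out : Bool) : Prop := out = aplicar_filtros_alt numeros filtros
instance (numeros : List Int) (filtros : List (String × List Int)) (out : Bool) : Decidable (Spec_aplicar_filtros numeros filtros out) := by unfold Spec_aplicar_filtros; infer_instance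

-- ===== CLAIM (what is proved, stated in full; the proofs are below) =====
def Claim_equal_aplicar_filtros : Prop := ∀ (numeros : List Int) (filtros : List (String × List Int)), Dom_aplicar_filtros numeros filtros → Pre_aplicar_filtros numeros filtros → Spec_aplicar_filtros numeros filtros (aplicar_filtros numeros filtros)

-- ===== LEMMAS AND PROOFS =====

-- Σ_{v ∈ S} [x = v] = [x ∈ S] for a duplicate-free S
lemma sum_indicator (S : List Int) (x : Int) (h : S.Nodup) :
    (S.map (fun v => if x = v then (1 : Nat) else 0)).sum = (if x ∈ S then 1 else 0) := by
  induction S with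
  | nil => simp
  | cons y ys ih =>
    simp only [List.map_cons, List.sum_cons, List.mem_cons]
    rcases List.nodup_cons.mp h with ⟨hy, hys⟩
    by_cases hxy : x = y
    · subst hxy
      simp [ih hys, hy]
    · simp [hxy, ih hys]

-- the histogram summed over a duplicate-free group equals the filtered-scan count
lemma sum_count_eq_filter_length (numeros S : List Int) (h : S.Nodup) :
    (S.map (fun v => numeros.count v)).sum
      = (numeros.filter (fun n => decide (n ∈ S))).length := by
  induction numeros with
  | nil => simp
  | cons x xs ih =>
    have hcons : ∀ v : Int, (x :: xs).count v = xs.count v + (if x = v then 1 else 0) := by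
      intro v; by_cases hv : x = v <;> simp [hv]
    simp only [List.filter_cons, hcons]
    rw [List.sum_map_add, ih, sum_indicator S x h]
    by_cases hx : x ∈ S <;> simp [hx]

-- B's per-group occurrence sum equals A's filter count, as integers
lemma occ_eq (numeros S : List Int) (h : S.Nodup) :
    (S.map (fun v =>
        (numeros.foldl (fun d num => d.insert num (d.getD num 0 + 1)) PySem.Dict.empty).getD v 0)).sum
      = ((numeros.filter (fun n => decide (n ∈ S))).length : Int) := by
  have hget : ∀ v : Int,
      (numeros.foldl (fun d num => d.insert num (d.getD num 0 + 1)) PySem.Dict.empty).getD v 0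
        = (numeros.count v : Int) := by
    intro v
    rw [PySem.Dict.getD_foldl_insert_add_one]
    simp [PySem.Dict.getD_empty]
  simp only [hget]
  rw [← sum_count_eq_filter_length numeros S h]
  induction S with
  | nil => simp
  | cons y ys ihS =>
    rcases List.nodup_cons.mp h with ⟨_, hys⟩
    simp only [List.map_cons, List.sum_cons, ihS hys]
    push_cast; ring

-- ===== VERDICT (by name: the statement is the Claim_ definition above) =====
theorem aplicar_filtros_spec : Claim_equal_aplicar_filtros := by
  intro numeros filtros _ _
  unfold Spec_aplicar_filtros aplicar_filtros aplicar_filtros_alt pvChecks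
  simp only [List.all_cons, List.all_nil,
    occ_eq numeros pvPrimos (by decide), occ_eq numeros pvFibonacci (by decide),
    occ_eq numeros pvMagicos (by decide), occ_eq numeros pvMultiplos3 (by decide)]
  split_ifs with hA
  · symm
    simp only [Bool.and_eq_true, decide_eq_true_eq, and_true]
    tauto
  · symm
    rw [Bool.eq_false_iff]
    intro hB
    simp only [Bool.and_eq_true, decide_eq_true_eq] at hB
    exact hA (by tauto)
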